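-- pv_equiv track=rewrite | github.com/Spooore/padt1 | exclude_vectors.py | find_annotations
-- ===== SOURCE A (Python) =====
-- def find_annotations(document : str):
--     '''
--     Searches for all occurances of '<' and '>' in the document.
--     Returns lists of indexes of occurances opening for '<' and closing for '>'
--     '''
--     i = 0
--     opening = list()
--     closing = list()
--     while i != -1:
--         i = document.find('<', i)
--         opening.append(i)
--         if i == -1:
--             closing.append(-1)
--             break
--         i = document.find('>', i)
--         closing.append(i)
--     closing = [cl + 1 for cl in closing]
--     closing[-1] = -1
--     return(opening, closing)
-- ===== SOURCE B (Python) =====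
-- def find_annotations(document : str):
--     '''
--     Searches for all occurances of '<' and '>' in the document.
--     Returns lists of indexes of occurances opening for '<' and closing for '>'
--     '''
--     opens = [i for i, c in enumerate(document) if c == '<']
--     closes = [i for i, c in enumerate(document) if c == '>']
--     opening = []
--     closing = []
--     t = 0
--     oi = 0
--     ci = 0
--     while True:
--         while oi < len(opens) and opens[oi] < t:
--             oi += 1
--         if oi == len(opens):
--             opening.append(-1)
--             closing.append(-1)
--             break
--         o = opens[oi]
--         oi += 1
--         opening.append(o)
--         while ci < len(closes) and closes[ci] <= o:
--             ci += 1
--         if ci == len(closes):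
--             closing.append(-1)
--             break
--         c = closes[ci]
--         ci += 1
--         closing.append(c + 1)
--         t = c
--     return (opening, closing)
-- ===== Notes on version B (the rewrite author's own statement) =====
-- stated objective: alternative
-- what changed: B first builds the index lists of all opening-marker and all closing-marker positions in one enumerate pass each, then produces the result pairs by a two-pointer merge over those two lists, instead of A's repeated str.find scans followed by post-processing (the shift by one and the forced trailing sentinel are produced directly during the merge).
import Mathlib
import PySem

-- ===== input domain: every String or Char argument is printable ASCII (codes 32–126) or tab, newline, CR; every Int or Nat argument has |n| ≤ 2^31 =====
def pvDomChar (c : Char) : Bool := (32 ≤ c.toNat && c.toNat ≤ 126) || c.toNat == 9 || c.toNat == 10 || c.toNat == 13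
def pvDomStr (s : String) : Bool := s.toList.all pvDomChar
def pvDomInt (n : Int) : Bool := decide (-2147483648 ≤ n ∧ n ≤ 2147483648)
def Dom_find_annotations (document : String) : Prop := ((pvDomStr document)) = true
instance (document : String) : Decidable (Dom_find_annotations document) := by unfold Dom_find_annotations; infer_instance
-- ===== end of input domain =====

-- B replaces A's repeated str.find scans by one enumerate pass building the '<' and '>' index
-- lists and a two-pointer merge over them (objective: alternative, same asymptotic cost).

-- ===== PORT A =====
-- The while-loop of A, with a fuel guard (fuel = length + 1 bounds the number of iterations,
-- since the scan position strictly increases each iteration; the fuel-0 branch is unreachable).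
def findAnnotAux (document : String) (fuel : Nat) (i : Int)
    (opening closing : List Int) : List Int × List Int :=
  match fuel with
  | 0 => (opening, closing)
  | fuel + 1 =>
    if i = -1 then (opening, closing)
    else
      let j := PySem.Str.findFrom document "<" i      -- i = document.find('<', i)
      if j = -1 then (opening ++ [j], closing ++ [-1])
      else
        let k := PySem.Str.findFrom document ">" j    -- i = document.find('>', i)
        findAnnotAux document fuel k (opening ++ [j]) (closing ++ [k])

def find_annotations (document : String) : List Int × List Int :=
  let r := findAnnotAux document (document.toList.length + 1) 0 [] []
  -- closing = [cl + 1 for cl in closing]; closing[-1] = -1  (closing is always nonempty here)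
  (r.1, (r.2.map (fun cl => cl + 1)).dropLast ++ [-1])

-- ===== PORT B =====
-- opens/closes = [i for i, c in enumerate(document) if c == ch]
def pyIndicesOf (ch : Char) (cs : List Char) : List Int :=
  ((PySem.List.enumerate cs).filter (fun p => p.2 == ch)).map (fun p => p.1)

-- The two-pointer merge loop of B; the pointer positions oi/ci are represented as the
-- remaining suffixes of opens/closes, pointer advancement (the inner while loops) as dropWhile.
def mergeAux (opens closes : List Int) (t : Int) (opening closing : List Int) :
    List Int × List Int :=
  match h : opens.dropWhile (fun o => decide (o < t)) with
  | [] => (opening ++ [-1], closing ++ [-1])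
  | o :: rest =>
    match closes.dropWhile (fun c => decide (c ≤ o)) with
    | [] => (opening ++ [o], closing ++ [-1])
    | c :: crest => mergeAux rest crest c (opening ++ [o]) (closing ++ [c + 1])
termination_by opens.length
decreasing_by
  have hle := List.length_dropWhile_le (fun o => decide (o < t)) opens
  rw [h] at hle
  simp at hle
  omega

def find_annotations_alt (document : String) : List Int × List Int :=
  mergeAux (pyIndicesOf '<' document.toList) (pyIndicesOf '>' document.toList) 0 [] []

-- ===== PRECONDITION & SPEC =====
def Spec_find_annotations (document : String) (out : List Int × List Int) : Prop := out = find_annotations_alt document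
instance (document : String) (out : List Int × List Int) : Decidable (Spec_find_annotations document out) := by unfold Spec_find_annotations; infer_instance

-- ===== CLAIM (what is proved, stated in full; the proofs are below) =====
def Claim_equal_find_annotations : Prop := ∀ (document : String), Dom_find_annotations document → Spec_find_annotations document (find_annotations document)

-- ===== LEMMAS AND PROOFS =====

lemma dropWhile_append_left_nil {p : Int → Bool} {d l : List Int} (h : ∀ e ∈ d, p e = true) :
    (d ++ l).dropWhile p = l.dropWhile p := by
  rw [List.dropWhile_append, List.dropWhile_eq_nil_iff.mpr h]
  simp

lemma dropWhile_congr_mem {p q : Int → Bool} {l : List Int} (h : ∀ x ∈ l, p x = q x) :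
    l.dropWhile p = l.dropWhile q := by
  induction l with
  | nil => rfl
  | cons a t ih =>
    simp only [List.dropWhile_cons, h a (by simp)]
    split <;> simp_all

lemma mem_of_dropWhile_cons {p : Int → Bool} {l : List Int} {o : Int} {r : List Int}
    (h : l.dropWhile p = o :: r) : o ∈ l := by
  have := List.takeWhile_append_dropWhile (p := p) (l := l)
  rw [h] at this
  rw [← this]
  simp

lemma head_dropWhile_false {p : Int → Bool} {l : List Int} {o : Int} {r : List Int}
    (h : l.dropWhile p = o :: r) : p o = false := by
  have := List.head?_dropWhile_not p l
  rw [h] at this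
  simpa using this

lemma singleton_infix_iff_mem {a : Char} {l : List Char} : [a] <:+: l ↔ a ∈ l := by
  constructor
  · intro h
    exact List.singleton_sublist.mp h.sublist
  · intro h
    obtain ⟨s, t, rfl⟩ := List.append_of_mem h
    exact ⟨s, t, by simp⟩

lemma singleton_prefix_drop {cs : List Char} {ch : Char} {i : Nat} :
    [ch] <+: cs.drop i ↔ cs[i]? = some ch := by
  rw [← List.head?_drop]
  cases h : cs.drop i with
  | nil => simp
  | cons b t => simp [List.cons_prefix_cons, eq_comm]

lemma mem_pyIndicesOf {ch : Char} {cs : List Char} {o : Int} :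
    o ∈ pyIndicesOf ch cs ↔ 0 ≤ o ∧ cs[o.toNat]? = some ch := by
  constructor
  · intro h
    simp only [pyIndicesOf, List.mem_map, List.mem_filter] at h
    obtain ⟨⟨i, c⟩, ⟨hmem, hc⟩, rfl⟩ := h
    rw [PySem.List.mem_enumerate_iff] at hmem
    obtain ⟨k, hk, hpk⟩ := hmem
    simp only [Prod.mk.injEq] at hpk
    obtain ⟨h1, h2⟩ := hpk
    subst h1
    simp only [beq_iff_eq] at hc
    subst hc
    refine ⟨by simp, ?_⟩
    have : ((0 : Int) + (k : Int)).toNat = k := by omega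
    rw [this, List.getElem?_eq_some_iff]
    exact ⟨hk, h2.symm⟩
  · rintro ⟨h0, hget⟩
    rw [List.getElem?_eq_some_iff] at hget
    obtain ⟨hlt, hval⟩ := hget
    simp only [pyIndicesOf, List.mem_map, List.mem_filter]
    refine ⟨(o, ch), ⟨?_, by simp⟩, rfl⟩
    rw [PySem.List.mem_enumerate_iff]
    exact ⟨o.toNat, hlt, by simp [hval]; omega⟩

lemma sorted_pyIndicesOf (ch : Char) (cs : List Char) :
    (pyIndicesOf ch cs).Pairwise (· < ·) := by
  have h := PySem.List.pairwise_lt_enumerate cs 0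
  exact (h.filter _).map _ (fun a b hab => hab)

lemma length_pyIndicesOf_le (ch : Char) (cs : List Char) :
    (pyIndicesOf ch cs).length ≤ cs.length := by
  unfold pyIndicesOf
  rw [List.length_map]
  calc (List.filter _ (PySem.List.enumerate cs)).length
      ≤ (PySem.List.enumerate cs).length := List.length_filter_le _ _
    _ = cs.length := PySem.List.length_enumerate cs 0

-- The find lemma: a single-character str.find(ch, t) equals the head of the suffix of the
-- ch-index list starting at the first index ≥ t, or -1 if that suffix is empty.
lemma findChar_eq (cs : List Char) (ch : Char) (t : Nat) (ht : t ≤ cs.length) :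
    PySem.Chars.findFrom cs [ch] (t : Int) =
      match (pyIndicesOf ch cs).dropWhile (fun o => decide (o < (t : Int))) with
      | [] => -1
      | o :: _ => o := by
  cases h : (pyIndicesOf ch cs).dropWhile (fun o => decide (o < (t : Int))) with
  | nil =>
    rw [PySem.Chars.findFrom_natCast_eq_neg_one_iff cs [ch] t ht]
    intro hinf
    have hmemd : ch ∈ cs.drop t := singleton_infix_iff_mem.mp hinf
    obtain ⟨j, hj, hget⟩ := List.mem_iff_getElem.mp hmemd
    have hget? : cs[t + j]? = some ch := by
      rw [← List.getElem?_drop]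
      exact List.getElem?_eq_some_iff.mpr ⟨hj, hget⟩
    have hmem : ((t + j : Nat) : Int) ∈ pyIndicesOf ch cs := by
      rw [mem_pyIndicesOf]
      constructor
      · positivity
      · simpa using hget?
    have := List.dropWhile_eq_nil_iff.mp h _ hmem
    simp at this
    omega
  | cons o rest =>
    -- o is the least ch-index ≥ t
    show PySem.Chars.findFrom cs [ch] (t : Int) = o
    have homem : o ∈ pyIndicesOf ch cs := mem_of_dropWhile_cons h
    obtain ⟨ho0, hoget⟩ := mem_pyIndicesOf.mp homem
    have hto : (t : Int) ≤ o := by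
      have := head_dropWhile_false h
      simp at this
      omega
    have holt : o.toNat < cs.length := (List.getElem?_eq_some_iff.mp hoget).1
    -- findFrom is not -1
    have hne : PySem.Chars.findFrom cs [ch] (t : Int) ≠ -1 := by
      rw [ne_eq, PySem.Chars.findFrom_natCast_eq_neg_one_iff cs [ch] t ht]
      intro hno
      apply hno
      rw [singleton_infix_iff_mem]
      have : (cs.drop t)[o.toNat - t]? = some ch := by
        rw [List.getElem?_drop]
        have : t + (o.toNat - t) = o.toNat := by omega
        rw [this]; exact hoget
      exact List.mem_of_getElem? this
    obtain ⟨hr1, hr2, hr3⟩ := PySem.Chars.findFrom_natCast_spec cs [ch] t ht hne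
    set r := PySem.Chars.findFrom cs [ch] (t : Int) with hrdef
    have hr0 : 0 ≤ r := le_trans (by omega) hr1
    have hrget : cs[r.toNat]? = some ch := singleton_prefix_drop.mp hr2
    -- r ≤ o : minimality of r
    have hro : r ≤ o := by
      by_contra hlt
      push Not at hlt
      have : o.toNat < r.toNat := by omega
      exact hr3 o.toNat (by omega) this (singleton_prefix_drop.mpr hoget)
    -- o ≤ r : o is least in the dropWhile suffix and r is in it
    have hor : o ≤ r := by
      have hrmem : r ∈ pyIndicesOf ch cs := mem_pyIndicesOf.mpr ⟨hr0, hrget⟩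
      have hsplit := List.takeWhile_append_dropWhile
        (p := fun o => decide (o < (t : Int))) (l := pyIndicesOf ch cs)
      rw [h] at hsplit
      have hrmem' : r ∈ (pyIndicesOf ch cs).takeWhile (fun o => decide (o < (t : Int)))
          ∨ r ∈ o :: rest := by
        rw [← List.mem_append, hsplit]; exact hrmem
      rcases hrmem' with hrt | hrc
      · have := List.mem_takeWhile_imp hrt
        simp at this
        omega
      · rcases List.mem_cons.mp hrc with heq | hmemr
        · omega
        · have hsorted := sorted_pyIndicesOf ch cs
          rw [← hsplit] at hsorted
          have := (List.pairwise_append.mp hsorted).2.1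
          rw [List.pairwise_cons] at this
          exact le_of_lt (this.1 r hmemr)
    omega


lemma mergeAux_eq_nil {opens closes : List Int} {t : Int} {opening closing : List Int}
    (h : opens.dropWhile (fun o => decide (o < t)) = []) :
    mergeAux opens closes t opening closing = (opening ++ [-1], closing ++ [-1]) := by
  rw [mergeAux]
  split
  · rfl
  · rename_i o rest heq
    rw [h] at heq
    exact absurd heq (by simp)

lemma mergeAux_eq_noclose {opens closes : List Int} {t : Int} {opening closing : List Int}
    {o : Int} {rest : List Int}
    (h : opens.dropWhile (fun x => decide (x < t)) = o :: rest)
    (h2 : closes.dropWhile (fun c => decide (c ≤ o)) = []) :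
    mergeAux opens closes t opening closing = (opening ++ [o], closing ++ [-1]) := by
  rw [mergeAux]
  split
  · rename_i heq
    rw [h] at heq
    exact absurd heq (by simp)
  · rename_i o' rest' heq
    rw [h] at heq
    obtain ⟨rfl, rfl⟩ := by simpa using heq
    split
    · rfl
    · rename_i c' crest' heq2
      rw [h2] at heq2
      exact absurd heq2 (by simp)

lemma mergeAux_eq_step {opens closes : List Int} {t : Int} {opening closing : List Int}
    {o c : Int} {rest crest : List Int}
    (h : opens.dropWhile (fun x => decide (x < t)) = o :: rest)
    (h2 : closes.dropWhile (fun x => decide (x ≤ o)) = c :: crest) :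
    mergeAux opens closes t opening closing =
      mergeAux rest crest c (opening ++ [o]) (closing ++ [c + 1]) := by
  rw [mergeAux]
  split
  · rename_i heq
    rw [h] at heq
    exact absurd heq (by simp)
  · rename_i o' rest' heq
    rw [h] at heq
    obtain ⟨rfl, rfl⟩ := by simpa using heq
    split
    · rename_i heq2
      rw [h2] at heq2
      exact absurd heq2 (by simp)
    · rename_i c' crest' heq2
      rw [h2] at heq2
      obtain ⟨rfl, rfl⟩ := by simpa using heq2
      rfl

-- The master simulation: A's loop and B's merge produce the same opening list, and B's closing
-- list is A's raw closing list shifted by one with the last element replaced by -1.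
lemma master (document : String) (fuel : Nat) :
    ∀ (t : Nat) (opens closes op cl : List Int),
      (∃ d, pyIndicesOf '<' document.toList = d ++ opens ∧ ∀ e ∈ d, e < (t : Int)) →
      (∃ d, pyIndicesOf '>' document.toList = d ++ closes ∧ ∀ e ∈ d, e ≤ (t : Int)) →
      t ≤ document.toList.length →
      opens.length < fuel →
      ∃ P Craw, Craw ≠ [] ∧
        findAnnotAux document fuel (t : Int) op cl = (op ++ P, cl ++ Craw) ∧
        mergeAux opens closes (t : Int) op (cl.map (fun x => x + 1)) =
          (op ++ P, cl.map (fun x => x + 1) ++ ((Craw.map (fun x => x + 1)).dropLast ++ [-1])) := by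
  induction fuel with
  | zero =>
    intro t opens closes op cl _ _ _ hf
    exact absurd hf (by omega)
  | succ fuel ih =>
    intro t opens closes op cl hO hC ht hf
    obtain ⟨dO, hOeq, hOlt⟩ := hO
    obtain ⟨dC, hCeq, hCle⟩ := hC
    have hdropO : opens.dropWhile (fun o => decide (o < (t : Int))) =
        (pyIndicesOf '<' document.toList).dropWhile (fun o => decide (o < (t : Int))) := by
      rw [hOeq, dropWhile_append_left_nil]
      intro e he
      simpa using hOlt e he
    cases hop : opens.dropWhile (fun o => decide (o < (t : Int))) with
    | nil =>
      have hfull : (pyIndicesOf '<' document.toList).dropWhile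
          (fun o => decide (o < (t : Int))) = [] := by rw [← hdropO]; exact hop
      have hj : PySem.Chars.findFrom document.toList ['<'] (t : Int) = -1 := by
        rw [findChar_eq _ _ _ ht, hfull]
      refine ⟨[-1], [-1], by simp, ?_, ?_⟩
      · simp only [findAnnotAux]
        rw [if_neg (show ¬((t : Int) = -1) by omega)]
        simp only [PySem.Str.findFrom_eq,
          show ("<" : String).toList = ['<'] from by decide, hj]
        simp
      · rw [mergeAux_eq_nil hop]
        simp
    | cons o rest =>
      have hfull : (pyIndicesOf '<' document.toList).dropWhile
          (fun x => decide (x < (t : Int))) = o :: rest := by rw [← hdropO]; exact hop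
      have hj : PySem.Chars.findFrom document.toList ['<'] (t : Int) = o := by
        rw [findChar_eq _ _ _ ht, hfull]
      have homem := mem_of_dropWhile_cons hfull
      obtain ⟨ho0, hoget⟩ := mem_pyIndicesOf.mp homem
      have hto : (t : Int) ≤ o := by
        have := head_dropWhile_false hfull
        simp at this
        omega
      have holt : o.toNat < document.toList.length := (List.getElem?_eq_some_iff.mp hoget).1
      have hcongr : (pyIndicesOf '>' document.toList).dropWhile (fun e => decide (e < o)) =
          (pyIndicesOf '>' document.toList).dropWhile (fun e => decide (e ≤ o)) := by
        apply dropWhile_congr_mem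
        intro x hx
        obtain ⟨hx0, hxget⟩ := mem_pyIndicesOf.mp hx
        have hxo : x ≠ o := by
          intro he
          rw [he, hoget] at hxget
          simp at hxget
        exact decide_eq_decide.mpr (by omega)
      have hdropC : closes.dropWhile (fun c => decide (c ≤ o)) =
          (pyIndicesOf '>' document.toList).dropWhile (fun c => decide (c ≤ o)) := by
        rw [hCeq, dropWhile_append_left_nil]
        intro e he
        have := hCle e he
        simp
        omega
      have hk0 := findChar_eq document.toList '>' o.toNat (le_of_lt holt)
      rw [show ((o.toNat : Nat) : Int) = o from by omega, hcongr, ← hdropC] at hk0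
      have hopLen : 1 ≤ opens.length := by
        have h1 := List.length_dropWhile_le (fun o => decide (o < (t : Int))) opens
        rw [hop] at h1
        simp at h1
        omega
      cases hcl : closes.dropWhile (fun c => decide (c ≤ o)) with
      | nil =>
        have hkv : PySem.Chars.findFrom document.toList ['>'] o = -1 := by rw [hk0, hcl]
        refine ⟨[o], [-1], by simp, ?_, ?_⟩
        · simp only [findAnnotAux]
          rw [if_neg (show ¬((t : Int) = -1) by omega)]
          simp only [PySem.Str.findFrom_eq,
            show ("<" : String).toList = ['<'] from by decide,
            show (">" : String).toList = ['>'] from by decide, hj, hkv]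
          rw [if_neg (show ¬(o = -1) by omega)]
          obtain ⟨fuel', rfl⟩ : ∃ n, fuel = n + 1 := ⟨fuel - 1, by omega⟩
          simp [findAnnotAux]
        · rw [mergeAux_eq_noclose hop hcl]
          simp
      | cons c crest =>
        have hkv : PySem.Chars.findFrom document.toList ['>'] o = c := by rw [hk0, hcl]
        have hcmemC : c ∈ pyIndicesOf '>' document.toList :=
          mem_of_dropWhile_cons (hdropC ▸ hcl)
        obtain ⟨hc0, hcget⟩ := mem_pyIndicesOf.mp hcmemC
        have hoc : o < c := by
          have := head_dropWhile_false hcl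
          simp at this
          omega
        have hclt : c.toNat < document.toList.length := (List.getElem?_eq_some_iff.mp hcget).1
        have hcast : ((c.toNat : Nat) : Int) = c := by omega
        have hO' : ∃ d, pyIndicesOf '<' document.toList = d ++ rest ∧
            ∀ e ∈ d, e < ((c.toNat : Nat) : Int) := by
          refine ⟨(pyIndicesOf '<' document.toList).takeWhile
            (fun x => decide (x < (t : Int))) ++ [o], ?_, ?_⟩
          · have hsplit := List.takeWhile_append_dropWhile
              (p := fun x => decide (x < (t : Int))) (l := pyIndicesOf '<' document.toList)
            rw [hfull] at hsplit
            rw [← List.append_cons]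
            exact hsplit.symm
          · intro e he
            rw [hcast]
            rcases List.mem_append.mp he with h1 | h1
            · have := List.mem_takeWhile_imp h1
              simp at this
              omega
            · simp at h1
              omega
        have hC' : ∃ d, pyIndicesOf '>' document.toList = d ++ crest ∧
            ∀ e ∈ d, e ≤ ((c.toNat : Nat) : Int) := by
          refine ⟨(pyIndicesOf '>' document.toList).takeWhile
            (fun x => decide (x ≤ o)) ++ [c], ?_, ?_⟩
          · have hsplit := List.takeWhile_append_dropWhile
              (p := fun x => decide (x ≤ o)) (l := pyIndicesOf '>' document.toList)
            rw [← hdropC, hcl] at hsplit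
            rw [← List.append_cons]
            exact hsplit.symm
          · intro e he
            rw [hcast]
            rcases List.mem_append.mp he with h1 | h1
            · have := List.mem_takeWhile_imp h1
              simp at this
              omega
            · simp at h1
              omega
        have hf' : rest.length < fuel := by
          have h1 := List.length_dropWhile_le (fun o => decide (o < (t : Int))) opens
          rw [hop] at h1
          simp at h1
          omega
        obtain ⟨P', Craw', hne', hA', hB'⟩ :=
          ih c.toNat rest crest (op ++ [o]) (cl ++ [c]) hO' hC' (le_of_lt hclt) hf'
        rw [hcast] at hA' hB'
        refine ⟨o :: P', c :: Craw', by simp, ?_, ?_⟩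
        · simp only [findAnnotAux]
          rw [if_neg (show ¬((t : Int) = -1) by omega)]
          simp only [PySem.Str.findFrom_eq,
            show ("<" : String).toList = ['<'] from by decide,
            show (">" : String).toList = ['>'] from by decide, hj, hkv]
          rw [if_neg (show ¬(o = -1) by omega)]
          rw [hA']
          simp
        · rw [mergeAux_eq_step hop hcl]
          rw [show cl.map (fun x => x + 1) ++ [c + 1] = (cl ++ [c]).map (fun x => x + 1)
            from by simp]
          rw [hB']
          have hdl : ((c :: Craw').map (fun x => x + 1)).dropLast =
              (c + 1) :: (Craw'.map (fun x => x + 1)).dropLast := by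
            simp only [List.map_cons]
            exact List.dropLast_cons_of_ne_nil (by simpa using hne')
          rw [hdl]
          simp

-- ===== VERDICT (by name: the statement is the Claim_ definition above) =====
theorem find_annotations_spec : Claim_equal_find_annotations := by
  intro document _
  unfold Spec_find_annotations
  obtain ⟨P, Craw, hne, hA, hB⟩ :=
    master document (document.toList.length + 1) 0
      (pyIndicesOf '<' document.toList) (pyIndicesOf '>' document.toList) [] []
      ⟨[], by simp⟩ ⟨[], by simp⟩ (Nat.zero_le _)
      (by have := length_pyIndicesOf_le '<' document.toList; omega)
  simp only [Nat.cast_zero] at hA hB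
  unfold find_annotations find_annotations_alt
  simp only [List.map_nil, List.nil_append] at hA hB
  rw [hA, hB]
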